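-- pv_equiv track=rewrite | github.com/fanff/tt3de | tests/test_c_triangle_buffer.py | pix_buff_to_string
-- ===== SOURCE A (Python) =====
-- def pix_buff_to_string(pixel_buffer,w,h,index_shift=1):
--     """
--
--     index_shift =
--     0 # triangle idx
--     1 # for material_id
--     """
--     lines = []
--     for yi in range(h):
--         ontheline = []
--         for xi in range(w):
--             index = (((h) * xi) + yi)*2   #  because that is its size
--             matid = str(pixel_buffer[index+index_shift])
--             ontheline.append(matid[:1])
--
--         lines.append("".join(ontheline))
--     return "\n".join(lines)
-- ===== SOURCE B (Python) =====
-- def pix_buff_to_string(pixel_buffer, w, h, index_shift=1):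
--     # Column-first extraction, then row assembly: each column xi is read once
--     # with a precomputed base offset and stride 2; rows are then joined from
--     # the w column lists (no per-cell index formula in the row pass).
--     if h <= 0:
--         return ""
--     cols = []
--     for xi in range(w):
--         base = 2 * h * xi + index_shift
--         cols.append([str(pixel_buffer[base + 2 * yi])[:1] for yi in range(h)])
--     return "\n".join("".join(col[yi] for col in cols) for yi in range(h))
-- ===== Notes on version B (the rewrite author's own statement) =====
-- stated objective: alternative
-- what changed: B extracts the buffer column-first (one base offset per column, stride-2 inner pass) and then assembles the rows from the w column lists, instead of A's row-major double loop recomputing the strided index for every cell.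
import Mathlib
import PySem

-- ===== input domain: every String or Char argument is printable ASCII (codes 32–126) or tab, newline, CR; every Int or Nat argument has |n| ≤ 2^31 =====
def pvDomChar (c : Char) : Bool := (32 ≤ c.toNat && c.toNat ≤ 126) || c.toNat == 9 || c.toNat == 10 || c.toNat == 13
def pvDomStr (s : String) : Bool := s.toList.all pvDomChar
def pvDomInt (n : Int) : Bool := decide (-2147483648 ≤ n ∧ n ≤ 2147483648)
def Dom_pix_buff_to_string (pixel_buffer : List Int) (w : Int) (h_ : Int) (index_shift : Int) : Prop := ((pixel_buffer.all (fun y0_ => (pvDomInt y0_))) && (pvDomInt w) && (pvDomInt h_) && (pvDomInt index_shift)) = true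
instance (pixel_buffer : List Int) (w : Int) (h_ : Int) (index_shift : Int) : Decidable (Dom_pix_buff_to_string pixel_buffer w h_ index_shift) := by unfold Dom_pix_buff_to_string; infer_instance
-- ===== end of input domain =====

-- B reads the buffer column-first (one base offset per column, stride-2 pass) and then
-- assembles the rows from the column lists, instead of A's row-major double loop
-- recomputing the strided index per cell; same cost, different decomposition.

-- ===== PORT A =====
def pix_buff_to_string (pixel_buffer : List Int) (w : Int) (h_ : Int) (index_shift : Int) : String :=
  let lines := (PySem.List.pyRange 0 h_ 1).foldl (fun lines yi =>
    let ontheline := (PySem.List.pyRange 0 w 1).foldl (fun ol xi =>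
      let index := ((h_ * xi) + yi) * 2
      let matid := PySem.Int.toStr (PySem.List.pyGetD pixel_buffer (index + index_shift) 0)
      ol ++ [PySem.Str.slice matid none (some 1)]) []
    lines ++ [PySem.Str.join "" ontheline]) []
  PySem.Str.join "\n" lines

-- ===== PORT B =====
def pix_buff_to_string_alt (pixel_buffer : List Int) (w : Int) (h_ : Int) (index_shift : Int) : String :=
  if h_ ≤ 0 then "" else
  let cols := (PySem.List.pyRange 0 w 1).foldl (fun cols xi =>
    let base := 2 * h_ * xi + index_shift
    cols ++ [(PySem.List.pyRange 0 h_ 1).map (fun yi =>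
      PySem.Str.slice (PySem.Int.toStr (PySem.List.pyGetD pixel_buffer (base + 2 * yi) 0)) none (some 1))]) []
  PySem.Str.join "\n" ((PySem.List.pyRange 0 h_ 1).map (fun yi =>
    PySem.Str.join "" (cols.map (fun col => PySem.List.pyGetD col yi ""))))

-- ===== PRECONDITION & SPEC =====
-- Pre_ excludes exactly the inputs where A raises IndexError: when any cell is read
-- (w > 0 and h_ > 0), the smallest and largest accessed indices must be in Python range.
def Pre_pix_buff_to_string (pixel_buffer : List Int) (w : Int) (h_ : Int) (index_shift : Int) : Prop :=
  0 < w → 0 < h_ →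
    (-(pixel_buffer.length : Int) ≤ index_shift ∧ 2 * h_ * w - 2 + index_shift < pixel_buffer.length)
instance (pixel_buffer : List Int) (w : Int) (h_ : Int) (index_shift : Int) : Decidable (Pre_pix_buff_to_string pixel_buffer w h_ index_shift) := by unfold Pre_pix_buff_to_string; infer_instance

def pvWitness_pix_buff_to_string : List Int × Int × Int × Int := ([1, 2, 3, 4], 2, 1, 1)

def Spec_pix_buff_to_string (pixel_buffer : List Int) (w : Int) (h_ : Int) (index_shift : Int) (out : String) : Prop := out = pix_buff_to_string_alt pixel_buffer w h_ index_shift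
instance (pixel_buffer : List Int) (w : Int) (h_ : Int) (index_shift : Int) (out : String) : Decidable (Spec_pix_buff_to_string pixel_buffer w h_ index_shift out) := by unfold Spec_pix_buff_to_string; infer_instance

-- ===== CLAIM (what is proved, stated in full; the proofs are below) =====
def Claim_equal_pix_buff_to_string : Prop := ∀ (pixel_buffer : List Int) (w : Int) (h_ : Int) (index_shift : Int), Dom_pix_buff_to_string pixel_buffer w h_ index_shift → Pre_pix_buff_to_string pixel_buffer w h_ index_shift → Spec_pix_buff_to_string pixel_buffer w h_ index_shift (pix_buff_to_string pixel_buffer w h_ index_shift)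

-- ===== LEMMAS AND PROOFS =====

theorem pix_eq (pixel_buffer : List Int) (w h_ index_shift : Int) :
    pix_buff_to_string pixel_buffer w h_ index_shift
      = pix_buff_to_string_alt pixel_buffer w h_ index_shift := by
  unfold pix_buff_to_string pix_buff_to_string_alt
  by_cases hh : h_ ≤ 0
  · simp [hh, PySem.List.pyRange_one_eq_nil (by omega : h_ ≤ 0), PySem.Str.join]
  simp only [if_neg hh]
  simp only [PySem.List.foldl_append_singleton_eq_map, List.nil_append]
  congr 1
  refine List.map_congr_left (fun yi hyi => ?_)
  congr 1
  rw [List.map_map]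
  refine List.map_congr_left (fun xi hxi => ?_)
  have hy := (PySem.List.mem_pyRange_one).mp hyi
  simp only [Function.comp]
  rw [PySem.List.pyGetD_map_pyRange_of_nonneg _ _ _ _ hy.1 hy.2]
  ring_nf

-- ===== VERDICT (by name: the statement is the Claim_ definition above) =====
theorem pix_buff_to_string_spec : Claim_equal_pix_buff_to_string := by
  intro pb w h s _ _
  show _ = _
  exact pix_eq pb w h s
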